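-- pv_equiv track=rewrite | github.com/fdosalvo/horarios-proyecto | myapp/views.py | calculate_available
-- ===== SOURCE A (Python) =====
-- def calculate_available(total_start, total_end, assigned):
--     available = []
--     if not assigned:
--         return [(total_start, total_end)]
--     if total_start < assigned[0][0]:
--         available.append((total_start, assigned[0][0]))
--     for i in range(len(assigned)-1):
--         current_end = assigned[i][1]
--         next_start = assigned[i+1][0]
--         if current_end < next_start:
--             available.append((current_end, next_start))
--     last_end = assigned[-1][1]
--     if last_end < total_end:
--         available.append((last_end, total_end))
--     return available
-- ===== SOURCE B (Python) =====
-- def calculate_available(total_start, total_end, assigned):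
--     if not assigned:
--         return [(total_start, total_end)]
--     return _gaps(total_start, total_end, assigned)
--
-- def _gaps(cursor, total_end, intervals):
--     # cursor = end of the last interval already consumed
--     if not intervals:
--         return [(cursor, total_end)] if cursor < total_end else []
--     start, end = intervals[0]
--     rest = _gaps(end, total_end, intervals[1:])
--     return ([(cursor, start)] + rest) if cursor < start else rest
-- ===== Notes on version B (the rewrite author's own statement) =====
-- stated objective: alternative
-- what changed: Replaces A's three-phase iterative scan (head-gap check, index loop with appends over interior neighbours, tail-gap check) with a recursive helper that threads a single 'cursor' (end of the last consumed interval) through the list and builds the gap list back-to-front by consing.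
import Mathlib
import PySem

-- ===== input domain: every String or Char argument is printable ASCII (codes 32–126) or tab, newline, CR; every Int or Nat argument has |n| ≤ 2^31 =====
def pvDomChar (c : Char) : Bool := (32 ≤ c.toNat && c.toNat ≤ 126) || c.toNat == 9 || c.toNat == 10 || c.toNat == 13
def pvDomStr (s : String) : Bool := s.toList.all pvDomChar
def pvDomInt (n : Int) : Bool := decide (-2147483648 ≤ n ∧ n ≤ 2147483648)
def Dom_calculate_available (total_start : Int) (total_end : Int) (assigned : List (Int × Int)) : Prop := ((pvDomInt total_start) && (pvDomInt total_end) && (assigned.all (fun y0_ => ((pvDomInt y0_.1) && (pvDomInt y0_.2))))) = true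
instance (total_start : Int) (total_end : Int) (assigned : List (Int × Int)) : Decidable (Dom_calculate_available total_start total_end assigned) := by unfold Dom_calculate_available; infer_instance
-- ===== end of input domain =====

-- B replaces A's three-phase iterative scan (head check, index loop, tail check) by a
-- recursive helper threading a cursor through the list, consing gaps back-to-front
-- (objective: alternative decomposition, same cost).

-- ===== PORT A =====
def calculate_available (total_start : Int) (total_end : Int) (assigned : List (Int × Int)) : List (Int × Int) :=
  if assigned = [] then [(total_start, total_end)]
  else
    let available : List (Int × Int) :=
      if total_start < (PySem.List.pyGetD assigned 0 ((0:Int),(0:Int))).1 then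
        [(total_start, (PySem.List.pyGetD assigned 0 ((0:Int),(0:Int))).1)]
      else []
    let available :=
      (PySem.List.pyRange 0 ((assigned.length : Int) - 1) 1).foldl
        (fun acc i =>
          let current_end := (PySem.List.pyGetD assigned i ((0:Int),(0:Int))).2
          let next_start := (PySem.List.pyGetD assigned (i+1) ((0:Int),(0:Int))).1
          if current_end < next_start then acc ++ [(current_end, next_start)] else acc)
        available
    let last_end := (PySem.List.pyGetD assigned (-1) ((0:Int),(0:Int))).2
    if last_end < total_end then available ++ [(last_end, total_end)] else available

-- ===== PORT B =====
-- B's recursive helper _gaps: cursor = end of last consumed interval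
def pvGaps (cursor : Int) (total_end : Int) (intervals : List (Int × Int)) : List (Int × Int) :=
  match intervals with
  | [] => if cursor < total_end then [(cursor, total_end)] else []
  | (s, e) :: rest =>
      let r := pvGaps e total_end rest
      if cursor < s then (cursor, s) :: r else r

def calculate_available_alt (total_start : Int) (total_end : Int) (assigned : List (Int × Int)) : List (Int × Int) :=
  if assigned = [] then [(total_start, total_end)]
  else pvGaps total_start total_end assigned

-- ===== PRECONDITION & SPEC =====
def Spec_calculate_available (total_start : Int) (total_end : Int) (assigned : List (Int × Int)) (out : List (Int × Int)) : Prop := out = calculate_available_alt total_start total_end assigned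
instance (total_start : Int) (total_end : Int) (assigned : List (Int × Int)) (out : List (Int × Int)) : Decidable (Spec_calculate_available total_start total_end assigned out) := by unfold Spec_calculate_available; infer_instance

-- ===== CLAIM (what is proved, stated in full; the proofs are below) =====
def Claim_equal_calculate_available : Prop := ∀ (total_start : Int) (total_end : Int) (assigned : List (Int × Int)), Dom_calculate_available total_start total_end assigned → Spec_calculate_available total_start total_end assigned (calculate_available total_start total_end assigned)

-- ===== LEMMAS AND PROOFS =====

-- proof-only helper: the gap list read off consecutive pairs of a list of intervals
def pvPairsOut (l : List (Int × Int)) : List (Int × Int) :=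
  ((l.zip (l.drop 1)).filter (fun p => p.1.2 < p.2.1)).map (fun p => (p.1.2, p.2.1))

theorem pvPairsOut_nil : pvPairsOut [] = [] := rfl

theorem pvPairsOut_singleton (x : Int × Int) : pvPairsOut [x] = [] := rfl

theorem pvPairsOut_cons_cons (p q : Int × Int) (l : List (Int × Int)) :
    pvPairsOut (p :: q :: l) =
      (if p.2 < q.1 then [(p.2, q.1)] else []) ++ pvPairsOut (q :: l) := by
  simp only [pvPairsOut, List.drop_succ_cons, List.drop_zero, List.zip_cons_cons, List.filter_cons]
  split_ifs with h <;> simp_all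

theorem pvPairsOut_append_singleton (m : List (Int × Int)) (hm : m ≠ []) (x : Int × Int) :
    pvPairsOut (m ++ [x]) =
      pvPairsOut m ++ (if (m.getLast hm).2 < x.1 then [((m.getLast hm).2, x.1)] else []) := by
  induction m with
  | nil => exact absurd rfl hm
  | cons q m ih =>
    cases m with
    | nil =>
      simp [pvPairsOut_cons_cons, pvPairsOut_singleton]
    | cons r m' =>
      have h' : r :: m' ≠ [] := by simp
      have := ih h'
      simp only [List.cons_append] at *
      rw [pvPairsOut_cons_cons, pvPairsOut_cons_cons q r m', this]
      simp [List.getLast_cons h', List.append_assoc]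

theorem pv_mid_foldl (l : List (Int × Int)) (acc : List (Int × Int)) :
    (PySem.List.pyRange 0 ((l.length : Int) - 1) 1).foldl
        (fun acc i =>
          if (PySem.List.pyGetD l i ((0:Int),(0:Int))).2 < (PySem.List.pyGetD l (i+1) ((0:Int),(0:Int))).1 then
            acc ++ [((PySem.List.pyGetD l i ((0:Int),(0:Int))).2, (PySem.List.pyGetD l (i+1) ((0:Int),(0:Int))).1)]
          else acc)
        acc = acc ++ pvPairsOut l := by
  induction l using List.reverseRecOn generalizing acc with
  | nil => simp [PySem.List.pyRange_one_eq_nil, pvPairsOut_nil]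
  | append_singleton m x ih =>
    by_cases hm : m = []
    · subst hm
      simp [PySem.List.pyRange_one_eq_nil, pvPairsOut_singleton]
    · have hlen : m.length ≠ 0 := fun h0 => hm (List.eq_nil_of_length_eq_zero h0)
      have hrange : PySem.List.pyRange 0 (((m ++ [x]).length : Int) - 1) 1 =
          PySem.List.pyRange 0 ((m.length : Int) - 1) 1 ++ [(m.length : Int) - 1] := by
        have he : ((m ++ [x]).length : Int) - 1 = ((m.length : Int) - 1) + 1 := by
          simp only [List.length_append, List.length_cons, List.length_nil]
          omega
        rw [he, PySem.List.pyRange_one_succ_right (by omega)]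
      have hcongr :
          (PySem.List.pyRange 0 ((m.length : Int) - 1) 1).foldl
            (fun acc i =>
              if (PySem.List.pyGetD (m ++ [x]) i ((0:Int),(0:Int))).2 < (PySem.List.pyGetD (m ++ [x]) (i+1) ((0:Int),(0:Int))).1 then
                acc ++ [((PySem.List.pyGetD (m ++ [x]) i ((0:Int),(0:Int))).2, (PySem.List.pyGetD (m ++ [x]) (i+1) ((0:Int),(0:Int))).1)]
              else acc)
            acc =
          (PySem.List.pyRange 0 ((m.length : Int) - 1) 1).foldl
            (fun acc i =>
              if (PySem.List.pyGetD m i ((0:Int),(0:Int))).2 < (PySem.List.pyGetD m (i+1) ((0:Int),(0:Int))).1 then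
                acc ++ [((PySem.List.pyGetD m i ((0:Int),(0:Int))).2, (PySem.List.pyGetD m (i+1) ((0:Int),(0:Int))).1)]
              else acc)
            acc := by
        apply PySem.List.foldl_congr_mem
        intro a i hi
        rw [PySem.List.mem_pyRange_one] at hi
        obtain ⟨h0, h1⟩ := hi
        have e1 : PySem.List.pyGetD (m ++ [x]) i ((0:Int),(0:Int)) = PySem.List.pyGetD m i ((0:Int),(0:Int)) := by
          rw [PySem.List.pyGetD_eq_getElem (m ++ [x]) ((0:Int),(0:Int)) h0
                (by simp only [List.length_append, List.length_cons, List.length_nil]; omega),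
              PySem.List.pyGetD_eq_getElem m ((0:Int),(0:Int)) h0 (by omega),
              List.getElem_append_left (by omega)]
        have e2 : PySem.List.pyGetD (m ++ [x]) (i+1) ((0:Int),(0:Int)) = PySem.List.pyGetD m (i+1) ((0:Int),(0:Int)) := by
          rw [PySem.List.pyGetD_eq_getElem (m ++ [x]) ((0:Int),(0:Int)) (by omega)
                (by simp only [List.length_append, List.length_cons, List.length_nil]; omega),
              PySem.List.pyGetD_eq_getElem m ((0:Int),(0:Int)) (by omega) (by omega),
              List.getElem_append_left (by omega)]
        simp only [e1, e2]
      have hidx : ((m.length : Int) - 1).toNat = m.length - 1 := by omega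
      have elast : PySem.List.pyGetD (m ++ [x]) ((m.length : Int) - 1) ((0:Int),(0:Int)) = m.getLast hm := by
        rw [PySem.List.pyGetD_eq_getElem (m ++ [x]) ((0:Int),(0:Int)) (by omega)
              (by simp only [List.length_append, List.length_cons, List.length_nil]; omega),
            List.getElem_append_left (by omega)]
        simp [List.getLast_eq_getElem, hidx]
      have enext : PySem.List.pyGetD (m ++ [x]) (((m.length : Int) - 1) + 1) ((0:Int),(0:Int)) = x := by
        have he : ((m.length : Int) - 1) + 1 = (m.length : Int) := by omega
        have hidx2 : ((m.length : Int)).toNat = m.length := by omega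
        rw [he, PySem.List.pyGetD_eq_getElem (m ++ [x]) ((0:Int),(0:Int)) (by omega)
              (by simp only [List.length_append, List.length_cons, List.length_nil]; omega)]
        simp [hidx2]
      rw [hrange, List.foldl_append, hcongr, ih]
      simp only [List.foldl_cons, List.foldl_nil, elast, enext,
        pvPairsOut_append_singleton m hm x]
      split_ifs with hgap <;> simp [List.append_assoc]

-- bridge: A's pairwise gap list over the padded sequence equals B's cursor recursion
theorem pvPairsOut_eq_gaps (te : Int) (l : List (Int × Int)) :
    ∀ (x cursor : Int), pvPairsOut ((x, cursor) :: (l ++ [(te, te)])) = pvGaps cursor te l := by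
  induction l with
  | nil =>
    intro x cursor
    simp [pvPairsOut_cons_cons, pvPairsOut_singleton, pvGaps]
  | cons p rest ih =>
    intro x cursor
    obtain ⟨s, e⟩ := p
    rw [List.cons_append, pvPairsOut_cons_cons, ih s e]
    simp [pvGaps]
    split_ifs <;> simp

-- ===== VERDICT (by name: the statement is the Claim_ definition above) =====
theorem calculate_available_spec : Claim_equal_calculate_available := by
  intro ts te assigned _
  by_cases h : assigned = []
  · simp [Spec_calculate_available, calculate_available, calculate_available_alt, h]
  · obtain ⟨a, rest, rfl⟩ := List.exists_cons_of_ne_nil h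
    simp only [Spec_calculate_available, calculate_available, calculate_available_alt]
    rw [if_neg h, if_neg h]
    rw [pv_mid_foldl]
    rw [PySem.List.pyGetD_neg_one _ _ h, PySem.List.pyGetD_zero_cons]
    rw [← pvPairsOut_eq_gaps te (a :: rest) ts ts]
    rw [List.cons_append, pvPairsOut_cons_cons, ← List.cons_append,
        pvPairsOut_append_singleton (a :: rest) h ((te, te))]
    split_ifs <;> simp_all
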